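-- pv_equiv track=rewrite | github.com/dpasch01/polarlib | polarlib/prism/cohesiveness/cohesiveness.py | get_entity_affiliations
-- ===== SOURCE A (Python) =====
-- def get_entity_affiliations(entity_party_dict):
--
--     entity_affiliation_dict = {}
--
--     democratic_entity_list = ['http://dbpedia.org/resource/Democratic_Party_(United_States)']
--     republican_entity_list = ['http://dbpedia.org/resource/Republican_Party_(United_States)']
--
--     for kv in entity_party_dict.items():
--
--         if 'Democratic Party (United States)' in kv[1]: democratic_entity_list.append(kv[0])
--         if 'Republican Party (United States)' in kv[1]: republican_entity_list.append(kv[0])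
--
--     for e in republican_entity_list:
--         if not e in democratic_entity_list: entity_affiliation_dict[e] = 'R'
--
--     for e in democratic_entity_list:
--         if not e in republican_entity_list: entity_affiliation_dict[e] = 'D'
--
--     return entity_affiliation_dict
-- ===== SOURCE B (Python) =====
-- def get_entity_affiliations(entity_party_dict):
--     DEM = 'Democratic Party (United States)'
--     REP = 'Republican Party (United States)'
--     r = {'http://dbpedia.org/resource/Republican_Party_(United_States)': 'R'}
--     d = {'http://dbpedia.org/resource/Democratic_Party_(United_States)': 'D'}
--     for e, parties in entity_party_dict.items():
--         if REP in parties and DEM not in parties: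
--             r[e] = 'R'
--         elif DEM in parties and REP not in parties:
--             d[e] = 'D'
--     return {**r, **d}
-- ===== Notes on version B (the rewrite author's own statement) =====
-- stated objective: simpler
-- what changed: Replaces A's build-two-candidate-lists-then-cross-membership-scan strategy (a linear scan per entity) by a single pass that classifies each entity directly from its own party list into two seeded dicts and merges them; Pre_ excludes association lists with duplicate keys (no Python dict produces them) and dicts using one of the two hard-coded party resource URLs as an entity key, where A's suppression or duplication of its own seed entries is an accident of its list-membership logic.
import Mathlib
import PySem

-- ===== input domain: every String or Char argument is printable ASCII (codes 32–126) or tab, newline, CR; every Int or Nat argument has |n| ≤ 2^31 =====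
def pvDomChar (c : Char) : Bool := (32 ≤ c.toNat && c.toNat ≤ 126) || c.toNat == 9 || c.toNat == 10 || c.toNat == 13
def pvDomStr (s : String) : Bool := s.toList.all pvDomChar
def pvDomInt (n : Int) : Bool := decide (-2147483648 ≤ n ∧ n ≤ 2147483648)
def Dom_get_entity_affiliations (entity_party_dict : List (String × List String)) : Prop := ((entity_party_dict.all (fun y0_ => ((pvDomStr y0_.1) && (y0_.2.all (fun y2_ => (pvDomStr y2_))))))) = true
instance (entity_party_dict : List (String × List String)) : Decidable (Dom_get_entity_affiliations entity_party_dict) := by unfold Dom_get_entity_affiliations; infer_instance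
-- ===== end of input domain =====

-- B classifies every entity in ONE pass from its own party list into two seeded dicts and
-- merges them, instead of A's two candidate lists with a cross membership scan per entity.

-- ===== PORT A =====
def get_entity_affiliations (entity_party_dict : List (String × List String)) : List (String × String) :=
  let entity_affiliation_dict : PySem.Dict String String := PySem.Dict.empty
  let democratic_entity_list := ["http://dbpedia.org/resource/Democratic_Party_(United_States)"]
  let republican_entity_list := ["http://dbpedia.org/resource/Republican_Party_(United_States)"]
  let lists := entity_party_dict.foldl
    (fun (st : List String × List String) kv =>
      let st := if kv.2.contains "Democratic Party (United States)" then (st.1 ++ [kv.1], st.2) else st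
      let st := if kv.2.contains "Republican Party (United States)" then (st.1, st.2 ++ [kv.1]) else st
      st)
    (democratic_entity_list, republican_entity_list)
  let d := lists.2.foldl (fun d e => if !(lists.1.contains e) then d.insert e "R" else d) entity_affiliation_dict
  let d := lists.1.foldl (fun d e => if !(lists.2.contains e) then d.insert e "D" else d) d
  d.items

-- ===== PORT B =====
def get_entity_affiliations_alt (entity_party_dict : List (String × List String)) : List (String × String) :=
  let r0 : PySem.Dict String String := PySem.Dict.ofList [("http://dbpedia.org/resource/Republican_Party_(United_States)", "R")]
  let d0 : PySem.Dict String String := PySem.Dict.ofList [("http://dbpedia.org/resource/Democratic_Party_(United_States)", "D")]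
  let st := entity_party_dict.foldl
    (fun (st : PySem.Dict String String × PySem.Dict String String) kv =>
      if kv.2.contains "Republican Party (United States)" && !(kv.2.contains "Democratic Party (United States)") then
        (st.1.insert kv.1 "R", st.2)
      else if kv.2.contains "Democratic Party (United States)" && !(kv.2.contains "Republican Party (United States)") then
        (st.1, st.2.insert kv.1 "D")
      else st)
    (r0, d0)
  (st.1.update st.2.items).items      -- {**r, **d}

-- ===== PRECONDITION & SPEC =====
-- The association list encodes a Python dict, whose keys are necessarily distinct, so duplicate
-- keys are ruled out; and Pre_ excludes dicts that use one of the two hard-coded party resource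
-- URLs as an entity key, where A's suppression or duplication of its own seed entries is an
-- accident of its list-membership logic.
def Pre_get_entity_affiliations (entity_party_dict : List (String × List String)) : Prop :=
  (entity_party_dict.map Prod.fst).Nodup ∧
  ∀ kv ∈ entity_party_dict,
    kv.1 ≠ "http://dbpedia.org/resource/Republican_Party_(United_States)" ∧
    kv.1 ≠ "http://dbpedia.org/resource/Democratic_Party_(United_States)"
instance (entity_party_dict : List (String × List String)) : Decidable (Pre_get_entity_affiliations entity_party_dict) := by unfold Pre_get_entity_affiliations; infer_instance

def pvWitness_get_entity_affiliations : (List (String × List String)) :=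
  [("a", ["Republican Party (United States)"]), ("b", ["Democratic Party (United States)", "x"]), ("c", [])]

def Spec_get_entity_affiliations (entity_party_dict : List (String × List String)) (out : List (String × String)) : Prop := out = get_entity_affiliations_alt entity_party_dict
instance (entity_party_dict : List (String × List String)) (out : List (String × String)) : Decidable (Spec_get_entity_affiliations entity_party_dict out) := by unfold Spec_get_entity_affiliations; infer_instance

-- ===== CLAIM (what is proved, stated in full; the proofs are below) =====
def Claim_equal_get_entity_affiliations : Prop := ∀ (entity_party_dict : List (String × List String)), Dom_get_entity_affiliations entity_party_dict → Pre_get_entity_affiliations entity_party_dict → Spec_get_entity_affiliations entity_party_dict (get_entity_affiliations entity_party_dict)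

-- ===== LEMMAS AND PROOFS =====
-- proof-only abbreviations: the two classifying predicates and the two key lists
def pvR : String × List String → Bool :=
  fun kv => kv.2.contains "Republican Party (United States)" && !(kv.2.contains "Democratic Party (United States)")
def pvD : String × List String → Bool :=
  fun kv => kv.2.contains "Democratic Party (United States)" && !(kv.2.contains "Republican Party (United States)")
def pvLR (l : List (String × List String)) : List String :=
  "http://dbpedia.org/resource/Republican_Party_(United_States)" :: (l.filter pvR).map Prod.fst
def pvLD (l : List (String × List String)) : List String :=
  "http://dbpedia.org/resource/Democratic_Party_(United_States)" :: (l.filter pvD).map Prod.fst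

theorem pv_uniq {l : List (String × List String)} (hN : (l.map Prod.fst).Nodup)
    {kv kv' : String × List String} (h1 : kv ∈ l) (h2 : kv' ∈ l) (he : kv.1 = kv'.1) : kv = kv' :=
  List.inj_on_of_nodup_map hN h1 h2 he

theorem pv_contains_key (x : String) (p : String × List String → Bool) (l : List (String × List String)) :
    ((l.filter p).map Prod.fst).contains x = l.any (fun kv => kv.1 == x && p kv) := by
  induction l with
  | nil => rfl
  | cons kv t ih =>
    rw [List.filter_cons, List.any_cons]
    cases h : p kv
    · rw [if_neg (by simp [h]), ih]
      simp
    · rw [if_pos (by simp [h]), List.map_cons, List.contains_cons, ih]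
      simp [BEq.comm]

theorem pv_mem_key {l : List (String × List String)} (hN : (l.map Prod.fst).Nodup)
    (p : String × List String → Bool) {kv : String × List String} (h : kv ∈ l) :
    ((l.filter p).map Prod.fst).contains kv.1 = p kv := by
  rw [pv_contains_key]
  cases hp : p kv
  · refine List.any_eq_false.2 ?_
    intro kv' h'
    cases he : kv'.1 == kv.1
    · simp
    · have : kv' = kv := pv_uniq hN h' h (by simpa using he)
      simp [this, hp]
  · exact List.any_eq_true.2 ⟨kv, h, by simp [hp]⟩

theorem pv_aLoop (l : List (String × List String)) (a b : List String) :
    l.foldl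
      (fun (st : List String × List String) kv =>
        let st := if kv.2.contains "Democratic Party (United States)" then (st.1 ++ [kv.1], st.2) else st
        let st := if kv.2.contains "Republican Party (United States)" then (st.1, st.2 ++ [kv.1]) else st
        st) (a, b)
    = (a ++ (l.filter (fun kv => kv.2.contains "Democratic Party (United States)")).map Prod.fst,
       b ++ (l.filter (fun kv => kv.2.contains "Republican Party (United States)")).map Prod.fst) := by
  induction l generalizing a b with
  | nil => simp
  | cons kv t ih =>
    rw [List.foldl_cons]
    cases h1 : kv.2.contains "Democratic Party (United States)" <;> cases h2 : kv.2.contains "Republican Party (United States)"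
    case false.false =>
      change List.foldl _ (a, b) t = _
      rw [ih]
      simp [(by simpa using h1 : "Democratic Party (United States)" ∉ kv.2), (by simpa using h2 : "Republican Party (United States)" ∉ kv.2)]
    case false.true =>
      change List.foldl _ (a, b ++ [kv.1]) t = _
      rw [ih]
      simp [(by simpa using h1 : "Democratic Party (United States)" ∉ kv.2), (by simpa using h2 : "Republican Party (United States)" ∈ kv.2)]
    case true.false =>
      change List.foldl _ (a ++ [kv.1], b) t = _
      rw [ih]
      simp [(by simpa using h1 : "Democratic Party (United States)" ∈ kv.2), (by simpa using h2 : "Republican Party (United States)" ∉ kv.2)]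
    case true.true =>
      change List.foldl _ (a ++ [kv.1], b ++ [kv.1]) t = _
      rw [ih]
      simp [(by simpa using h1 : "Democratic Party (United States)" ∈ kv.2), (by simpa using h2 : "Republican Party (United States)" ∈ kv.2)]

theorem pv_skipfold (l dl : List String) (v : String) (d : PySem.Dict String String) :
    l.foldl (fun d e => if !(dl.contains e) then d.insert e v else d) d
      = (l.filter (fun e => !(dl.contains e))).foldl (fun d e => d.insert e v) d := by
  induction l generalizing d with
  | nil => rfl
  | cons e t ih =>
    cases h : dl.contains e
    · rw [List.foldl_cons, if_pos (by simpa using h), List.filter_cons_of_pos (by simpa using h), List.foldl_cons]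
      exact ih (d.insert e v)
    · rw [List.foldl_cons, if_neg (by simpa using h), List.filter_cons_of_neg (by simpa using h)]
      exact ih d

-- A's candidate-list filter collapses, when no key equals a seed URL, to a per-entity test on the entity's own party list.
theorem pv_seclean (u w pOwn pOther : String) (l : List (String × List String))
    (hN : (l.map Prod.fst).Nodup) (huw : (u == w) = false)
    (hurl : ∀ kv ∈ l, kv.1 ≠ u ∧ kv.1 ≠ w) :
    (u :: (l.filter (fun kv => kv.2.contains pOwn)).map Prod.fst).filter
        (fun e => !((w :: (l.filter (fun kv => kv.2.contains pOther)).map Prod.fst).contains e))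
    = u :: (l.filter (fun kv => kv.2.contains pOwn && !(kv.2.contains pOther))).map Prod.fst := by
  have hcu : ((l.filter (fun kv => kv.2.contains pOther)).map Prod.fst).contains u = false := by
    rw [pv_contains_key]
    refine List.any_eq_false.2 (fun kv hkv => ?_)
    have : kv.1 ≠ u := (hurl kv hkv).1
    simp [this]
  rw [List.filter_cons_of_pos (by simp only [List.contains_cons, huw, hcu, Bool.false_or, Bool.not_false])]
  rw [List.filter_map, List.filter_filter]
  refine congrArg _ (congrArg _ (List.filter_congr (fun kv hkv => ?_)))
  have hK : ((l.filter (fun kv => kv.2.contains pOther)).map Prod.fst).contains kv.1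
      = kv.2.contains pOther := pv_mem_key hN _ hkv
  have hw : (kv.1 == w) = false := by
    have := (hurl kv hkv).2; simpa using this
  simp only [Function.comp_apply, List.contains_cons, hK, hw, Bool.false_or]
  cases h1 : kv.2.contains pOwn <;> cases h2 : kv.2.contains pOther <;> simp

-- B's one-pass fold splits into the two independent insert loops over the classified entities.
theorem pv_bfold (l : List (String × List String)) (r d : PySem.Dict String String) :
    l.foldl
      (fun (st : PySem.Dict String String × PySem.Dict String String) kv =>
        if kv.2.contains "Republican Party (United States)" && !(kv.2.contains "Democratic Party (United States)") then
          (st.1.insert kv.1 "R", st.2)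
        else if kv.2.contains "Democratic Party (United States)" && !(kv.2.contains "Republican Party (United States)") then
          (st.1, st.2.insert kv.1 "D")
        else st) (r, d)
    = ((l.filter pvR).foldl (fun d kv => d.insert kv.1 "R") r,
       (l.filter pvD).foldl (fun d kv => d.insert kv.1 "D") d) := by
  induction l generalizing r d with
  | nil => rfl
  | cons kv t ih =>
    rw [List.foldl_cons, List.filter_cons, List.filter_cons]
    cases h1 : kv.2.contains "Republican Party (United States)" <;> cases h2 : kv.2.contains "Democratic Party (United States)"
    case false.false =>
      rw [if_neg (by simp), if_neg (by simp),
        if_neg (by simp only [pvR]; rw [h1]; simp), if_neg (by simp only [pvD]; rw [h2]; simp)]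
      exact ih r d
    case false.true =>
      rw [if_neg (by simp), if_pos (by simp),
        if_neg (by simp only [pvR]; rw [h1]; simp), if_pos (by simp only [pvD]; rw [h1, h2]; simp), List.foldl_cons]
      exact ih r (d.insert kv.1 "D")
    case true.false =>
      rw [if_pos (by simp), if_pos (by simp only [pvR]; rw [h1, h2]; simp),
        if_neg (by simp only [pvD]; rw [h2]; simp), List.foldl_cons]
      exact ih (r.insert kv.1 "R") d
    case true.true =>
      rw [if_neg (by simp), if_neg (by simp),
        if_neg (by simp only [pvR]; rw [h2]; simp), if_neg (by simp only [pvD]; rw [h1]; simp)]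
      exact ih r d

theorem pv_nodup_seed (u : String) (p : String × List String → Bool)
    {l : List (String × List String)} (hN : (l.map Prod.fst).Nodup)
    (hu : ∀ kv ∈ l, kv.1 ≠ u) : (u :: (l.filter p).map Prod.fst).Nodup := by
  refine List.nodup_cons.2 ⟨fun hmem => ?_, hN.sublist ((l.filter_sublist (p := p)).map Prod.fst)⟩
  obtain ⟨kv, hkv, hk⟩ := List.mem_map.1 hmem
  exact hu kv (List.mem_of_mem_filter hkv) hk

theorem pv_disj {l : List (String × List String)} (hN : (l.map Prod.fst).Nodup)
    (hurl : ∀ kv ∈ l, kv.1 ≠ "http://dbpedia.org/resource/Republican_Party_(United_States)" ∧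
        kv.1 ≠ "http://dbpedia.org/resource/Democratic_Party_(United_States)") :
    ∀ e ∈ pvLD l, e ∉ pvLR l := by
  intro e he hr
  rcases List.mem_cons.1 he with rfl | he'
  · rcases List.mem_cons.1 hr with h | h
    · exact absurd h (by decide)
    · obtain ⟨kv, hkv, hk⟩ := List.mem_map.1 h
      exact (hurl kv (List.mem_of_mem_filter hkv)).2 hk
  · obtain ⟨kv, hkv, rfl⟩ := List.mem_map.1 he'
    rcases List.mem_cons.1 hr with h | h
    · exact (hurl kv (List.mem_of_mem_filter hkv)).1 h
    · obtain ⟨kv', hkv', hk'⟩ := List.mem_map.1 h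
      have : kv' = kv := pv_uniq hN (List.mem_of_mem_filter hkv') (List.mem_of_mem_filter hkv) hk'
      subst this
      have h1 := List.of_mem_filter hkv'
      have h2 := List.of_mem_filter hkv
      simp only [pvR, pvD, Bool.and_eq_true, Bool.not_eq_true'] at h1 h2
      rw [h1.2] at h2
      exact absurd h2.1 (by simp)

-- two insert loops over distinct fresh string keys, starting from the empty dict
theorem pv_two_lists (l1 l2 : List String) (v1 v2 : String)
    (h1 : l1.Nodup) (h2 : l2.Nodup) (hdis : ∀ e ∈ l2, e ∉ l1) :
    (l2.foldl (fun d e => d.insert e v2) (l1.foldl (fun d e => d.insert e v1) PySem.Dict.empty)).items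
      = l1.map (fun e => (e, v1)) ++ l2.map (fun e => (e, v2)) := by
  have step1 : (l1.foldl (fun d e => d.insert e v1) PySem.Dict.empty).items
      = l1.map (fun e => (e, v1)) := by
    have := PySem.Dict.items_foldl_insert_fresh l1 id (fun _ => v1) PySem.Dict.empty
      (fun a _ => PySem.Dict.contains_empty _) (by simpa using h1)
    simpa using this
  have hfresh : ∀ e ∈ l2, (l1.foldl (fun d e => d.insert e v1) PySem.Dict.empty).contains e = false := by
    intro e he
    cases hc : (l1.foldl (fun d e => d.insert e v1) PySem.Dict.empty).contains e
    · rfl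
    · exfalso
      have hk := (PySem.Dict.contains_iff_mem_keys _ _).1 hc
      simp only [PySem.Dict.keys, step1, List.map_map] at hk
      exact hdis e he (by simpa using hk)
  have := PySem.Dict.items_foldl_insert_fresh l2 id (fun _ => v2)
    (l1.foldl (fun d e => d.insert e v1) PySem.Dict.empty) (fun a ha => hfresh a ha) (by simpa using h2)
  simpa [step1] using this

theorem pv_Aside (l : List (String × List String)) (hN : (l.map Prod.fst).Nodup)
    (hurl : ∀ kv ∈ l, kv.1 ≠ "http://dbpedia.org/resource/Republican_Party_(United_States)" ∧
        kv.1 ≠ "http://dbpedia.org/resource/Democratic_Party_(United_States)")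
    (hndR : (pvLR l).Nodup) (hndD : (pvLD l).Nodup) (hdis : ∀ e ∈ pvLD l, e ∉ pvLR l) :
    ((("http://dbpedia.org/resource/Democratic_Party_(United_States)" :: (l.filter (fun kv => kv.2.contains "Democratic Party (United States)")).map Prod.fst).filter (fun e => !(("http://dbpedia.org/resource/Republican_Party_(United_States)" :: (l.filter (fun kv => kv.2.contains "Republican Party (United States)")).map Prod.fst).contains e))).foldl (fun d e => d.insert e "D")
      ((("http://dbpedia.org/resource/Republican_Party_(United_States)" :: (l.filter (fun kv => kv.2.contains "Republican Party (United States)")).map Prod.fst).filter (fun e => !(("http://dbpedia.org/resource/Democratic_Party_(United_States)" :: (l.filter (fun kv => kv.2.contains "Democratic Party (United States)")).map Prod.fst).contains e))).foldl (fun d e => d.insert e "R") PySem.Dict.empty)).items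
    = (pvLR l).map (fun e => (e, "R")) ++ (pvLD l).map (fun e => (e, "D")) := by
  have hurl2 : ∀ kv ∈ l, kv.1 ≠ "http://dbpedia.org/resource/Democratic_Party_(United_States)" ∧
      kv.1 ≠ "http://dbpedia.org/resource/Republican_Party_(United_States)" :=
    fun kv h => ⟨(hurl kv h).2, (hurl kv h).1⟩
  rw [pv_seclean "http://dbpedia.org/resource/Republican_Party_(United_States)"
      "http://dbpedia.org/resource/Democratic_Party_(United_States)"
      "Republican Party (United States)" "Democratic Party (United States)" l hN (by decide) hurl,
    pv_seclean "http://dbpedia.org/resource/Democratic_Party_(United_States)"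
      "http://dbpedia.org/resource/Republican_Party_(United_States)"
      "Democratic Party (United States)" "Republican Party (United States)" l hN (by decide) hurl2]
  exact pv_two_lists (pvLR l) (pvLD l) "R" "D" hndR hndD hdis

theorem pv_main (l : List (String × List String)) (hN : (l.map Prod.fst).Nodup)
    (hurl : ∀ kv ∈ l, kv.1 ≠ "http://dbpedia.org/resource/Republican_Party_(United_States)" ∧
        kv.1 ≠ "http://dbpedia.org/resource/Democratic_Party_(United_States)") :
    get_entity_affiliations l = get_entity_affiliations_alt l := by
  have hurl' : ∀ kv ∈ l, kv.1 ≠ "http://dbpedia.org/resource/Democratic_Party_(United_States)" ∧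
      kv.1 ≠ "http://dbpedia.org/resource/Republican_Party_(United_States)" :=
    fun kv h => ⟨(hurl kv h).2, (hurl kv h).1⟩
  have hndR : (pvLR l).Nodup := pv_nodup_seed _ _ hN (fun kv h => (hurl kv h).1)
  have hndD : (pvLD l).Nodup := pv_nodup_seed _ _ hN (fun kv h => (hurl kv h).2)
  have hdis := pv_disj hN hurl
  -- ===== A's value =====
  have hA : get_entity_affiliations l
      = (pvLR l).map (fun e => (e, "R")) ++ (pvLD l).map (fun e => (e, "D")) := by
    conv_lhs => simp only [get_entity_affiliations]
    conv_lhs => rw [pv_aLoop]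
    conv_lhs => rw [pv_skipfold]
    conv_lhs => rw [pv_skipfold]
    exact pv_Aside l hN hurl hndR hndD hdis
  -- ===== B's value =====
  have hB : get_entity_affiliations_alt l
      = (pvLR l).map (fun e => (e, "R")) ++ (pvLD l).map (fun e => (e, "D")) := by
    conv_lhs => simp only [get_entity_affiliations_alt]
    conv_lhs => rw [pv_bfold]
    have hr0fresh : ∀ kv ∈ l.filter pvR,
        (PySem.Dict.ofList [("http://dbpedia.org/resource/Republican_Party_(United_States)", "R")] : PySem.Dict String String).contains kv.1 = false := by
      intro kv hkv
      have hne : kv.1 ≠ "http://dbpedia.org/resource/Republican_Party_(United_States)" :=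
        (hurl kv (List.mem_of_mem_filter hkv)).1
      cases hc : (PySem.Dict.ofList [("http://dbpedia.org/resource/Republican_Party_(United_States)", "R")] : PySem.Dict String String).contains kv.1
      · rfl
      · have hk := (PySem.Dict.contains_iff_mem_keys _ _).1 hc
        have hkeys : (PySem.Dict.ofList [("http://dbpedia.org/resource/Republican_Party_(United_States)", "R")] : PySem.Dict String String).keys
            = ["http://dbpedia.org/resource/Republican_Party_(United_States)"] := rfl
        rw [hkeys] at hk
        exact (hne (by simpa using hk)).elim
    have hd0fresh : ∀ kv ∈ l.filter pvD,
        (PySem.Dict.ofList [("http://dbpedia.org/resource/Democratic_Party_(United_States)", "D")] : PySem.Dict String String).contains kv.1 = false := by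
      intro kv hkv
      have hne : kv.1 ≠ "http://dbpedia.org/resource/Democratic_Party_(United_States)" :=
        (hurl kv (List.mem_of_mem_filter hkv)).2
      cases hc : (PySem.Dict.ofList [("http://dbpedia.org/resource/Democratic_Party_(United_States)", "D")] : PySem.Dict String String).contains kv.1
      · rfl
      · have hk := (PySem.Dict.contains_iff_mem_keys _ _).1 hc
        have hkeys : (PySem.Dict.ofList [("http://dbpedia.org/resource/Democratic_Party_(United_States)", "D")] : PySem.Dict String String).keys
            = ["http://dbpedia.org/resource/Democratic_Party_(United_States)"] := rfl
        rw [hkeys] at hk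
        exact (hne (by simpa using hk)).elim
    have hst1 : ((l.filter pvR).foldl (fun d kv => d.insert kv.1 "R")
        (PySem.Dict.ofList [("http://dbpedia.org/resource/Republican_Party_(United_States)", "R")])).items
        = (pvLR l).map (fun e => (e, "R")) := by
      have := PySem.Dict.items_foldl_insert_fresh (l.filter pvR) Prod.fst (fun _ => "R")
        (PySem.Dict.ofList [("http://dbpedia.org/resource/Republican_Party_(United_States)", "R")])
        hr0fresh (by simpa using List.nodup_cons.1 hndR |>.2)
      simpa [pvLR, List.map_map, Function.comp_def] using this
    have hst2 : ((l.filter pvD).foldl (fun d kv => d.insert kv.1 "D")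
        (PySem.Dict.ofList [("http://dbpedia.org/resource/Democratic_Party_(United_States)", "D")])).items
        = (pvLD l).map (fun e => (e, "D")) := by
      have := PySem.Dict.items_foldl_insert_fresh (l.filter pvD) Prod.fst (fun _ => "D")
        (PySem.Dict.ofList [("http://dbpedia.org/resource/Democratic_Party_(United_States)", "D")])
        hd0fresh (by simpa using List.nodup_cons.1 hndD |>.2)
      simpa [pvLD, List.map_map, Function.comp_def] using this
    -- the merge {**r, **d}: every key of d is fresh in r
    have hmfresh : ∀ p ∈ ((l.filter pvD).foldl (fun d kv => d.insert kv.1 "D")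
        (PySem.Dict.ofList [("http://dbpedia.org/resource/Democratic_Party_(United_States)", "D")])).items,
        ((l.filter pvR).foldl (fun d kv => d.insert kv.1 "R")
          (PySem.Dict.ofList [("http://dbpedia.org/resource/Republican_Party_(United_States)", "R")])).contains p.1 = false := by
      intro p hp
      have hpd : p.1 ∈ pvLD l := by
        have : p ∈ (pvLD l).map (fun e => (e, "D")) := hst2 ▸ hp
        obtain ⟨e, he, hpe⟩ := List.mem_map.1 this
        simpa [← hpe] using he
      cases hc : ((l.filter pvR).foldl (fun d kv => d.insert kv.1 "R")
          (PySem.Dict.ofList [("http://dbpedia.org/resource/Republican_Party_(United_States)", "R")])).contains p.1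
      · rfl
      · exfalso
        have hk := (PySem.Dict.contains_iff_mem_keys _ _).1 hc
        simp only [PySem.Dict.keys, hst1, List.map_map] at hk
        exact hdis p.1 hpd (by simpa using hk)
    have hmnd : (((l.filter pvD).foldl (fun d kv => d.insert kv.1 "D")
        (PySem.Dict.ofList [("http://dbpedia.org/resource/Democratic_Party_(United_States)", "D")])).items.map Prod.fst).Nodup := by
      rw [hst2]
      simpa [List.map_map, Function.comp_def] using hndD
    have hupd := PySem.Dict.items_foldl_insert_fresh
      (((l.filter pvD).foldl (fun d kv => d.insert kv.1 "D")
        (PySem.Dict.ofList [("http://dbpedia.org/resource/Democratic_Party_(United_States)", "D")])).items)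
      Prod.fst Prod.snd
      ((l.filter pvR).foldl (fun d kv => d.insert kv.1 "R")
        (PySem.Dict.ofList [("http://dbpedia.org/resource/Republican_Party_(United_States)", "R")]))
      hmfresh hmnd
    simp only [PySem.Dict.update] at *
    rw [hupd, hst1, hst2]
    simp
  rw [hA, hB]

-- ===== VERDICT (by name: the statement is the Claim_ definition above) =====
theorem get_entity_affiliations_spec : Claim_equal_get_entity_affiliations := by
  intro l _ hPre
  unfold Spec_get_entity_affiliations
  exact pv_main l hPre.1 hPre.2
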